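-- pv_equiv track=rewrite | github.com/robinvierich/advent2022 | day3/day3-2.py | get_common_items_in_compartments
-- ===== SOURCE A (Python) =====
-- def binary_search(items, item):
--     low = 0
--     high = len(items) - 1
--
--     # Repeat until the pointers low and high meet each other
--     while low <= high:
--
--         mid = low + (high - low)//2
--
--         if items[mid] == item:
--             return mid
--
--         elif items[mid] < item:
--             low = mid + 1
--
--         else:
--             high = mid - 1
--
--     return -1
--
-- def get_common_items_in_compartments(compartments_with_sorted_items = []):
--
--     # sort by compartment length so we have the fewest # number of iterations
--     sorted_compartments = sorted(compartments_with_sorted_items, key=len)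
--
--     other_comps = sorted_compartments[1:]
--
--     # todo: use the priority of the item to exclude iterations
--
--     for item in sorted_compartments[0]:
--         found = True
--         for comp in other_comps:
--             if binary_search(comp, item) < 0:
--                 found = False
--                 break
--
--         if found:
--             return item
--
--     return None
-- ===== SOURCE B (Python) =====
-- def _bs_contains(items, item, low=0, high=None):
--     # same comparison sequence as an iterative binary search, expressed recursively
--     if high is None:
--         high = len(items) - 1
--     if low > high:
--         return False
--     mid = low + (high - low) // 2
--     if items[mid] == item:
--         return True
--     if items[mid] < item:
--         return _bs_contains(items, item, mid + 1, high)
--     return _bs_contains(items, item, low, mid - 1)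
--
-- def get_common_items_in_compartments(compartments_with_sorted_items=[]):
--     comps = sorted(compartments_with_sorted_items, key=len)
--     first, rest = comps[0], comps[1:]
--     return next((item for item in first
--                  if all(_bs_contains(c, item) for c in rest)), None)
-- ===== Notes on version B (the rewrite author's own statement) =====
-- stated objective: simpler
-- what changed: The iterative binary search returning an index is replaced by a recursive divide-and-conquer membership test returning a bool, and the outer flag-and-break loops are replaced by a next()/all() generator pipeline; the comparison sequence is identical so results match even on unsorted compartments.
import Mathlib
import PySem

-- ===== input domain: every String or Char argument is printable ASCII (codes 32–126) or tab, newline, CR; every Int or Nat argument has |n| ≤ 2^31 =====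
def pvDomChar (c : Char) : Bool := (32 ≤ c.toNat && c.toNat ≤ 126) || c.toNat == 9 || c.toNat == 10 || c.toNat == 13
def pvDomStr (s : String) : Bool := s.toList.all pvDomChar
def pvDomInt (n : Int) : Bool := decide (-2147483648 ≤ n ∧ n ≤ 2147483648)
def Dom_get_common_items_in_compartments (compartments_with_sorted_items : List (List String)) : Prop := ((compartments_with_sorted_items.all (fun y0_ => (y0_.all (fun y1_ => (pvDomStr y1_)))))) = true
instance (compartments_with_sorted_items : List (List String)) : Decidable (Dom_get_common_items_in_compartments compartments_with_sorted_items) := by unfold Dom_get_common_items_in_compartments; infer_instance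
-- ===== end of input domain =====

-- B replaces the iterative index-returning binary search by a recursive boolean one and the
-- flag/break loops by find?/all; same comparison sequence, so same result (objective: simpler).

-- ===== PORT A =====
-- the 'while low <= high' loop of binary_search, state (low, high); totalised by a fuel that
-- strictly exceeds the interval size (the interval shrinks every step, so fuel never runs out);
-- items[mid] is always in range on every state the loop reaches, so the pyGetD default is never used
def pvBsLoop (items : List String) (item : String) : Nat → Int → Int → Int
  | 0, _, _ => -1
  | fuel + 1, low, high =>
    if low ≤ high then
      let mid := low + PySem.Int.floordiv (high - low) 2
      let v := PySem.List.pyGetD items mid ""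
      if v = item then mid
      else if v < item then pvBsLoop items item fuel (mid + 1) high
      else pvBsLoop items item fuel low (mid - 1)
    else -1

def binary_search (items : List String) (item : String) : Int :=
  pvBsLoop items item (items.length + 1) 0 (PySem.List.len items - 1)

-- inner 'for comp in other_comps: … break' loop, returning the final 'found' flag
def pvCheckA (comps : List (List String)) (item : String) : Bool :=
  match comps with
  | [] => true
  | c :: rest => if binary_search c item < 0 then false else pvCheckA rest item

-- outer 'for item in sorted_compartments[0]' loop
def pvOuterA (other : List (List String)) (items : List String) : Option String :=
  match items with
  | [] => none
  | item :: rest => if pvCheckA other item then some item else pvOuterA other rest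

def get_common_items_in_compartments (compartments_with_sorted_items : List (List String)) : Option String :=
  let sorted_compartments := PySem.List.sorted compartments_with_sorted_items (fun c => c.length) false
  let other_comps := PySem.List.slice sorted_compartments (some 1) none
  match PySem.List.pyGet? sorted_compartments 0 with  -- sorted_compartments[0]: IndexError (none) on []
  | none => none
  | some first => pvOuterA other_comps first

-- ===== PORT B =====
-- recursive boolean binary search (_bs_contains in Source B), same fuel totalisation
def pvBsContains (items : List String) (item : String) : Nat → Int → Int → Bool
  | 0, _, _ => false
  | fuel + 1, low, high =>
    if low > high then false
    else
      let mid := low + PySem.Int.floordiv (high - low) 2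
      let v := PySem.List.pyGetD items mid ""
      if v = item then true
      else if v < item then pvBsContains items item fuel (mid + 1) high
      else pvBsContains items item fuel low (mid - 1)

def get_common_items_in_compartments_alt (compartments_with_sorted_items : List (List String)) : Option String :=
  match PySem.List.sorted compartments_with_sorted_items (fun c => c.length) false with
  | [] => none  -- Source B raises IndexError here (comps[0]); outside Pre_
  | first :: rest =>
      first.find? (fun item =>
        rest.all (fun c => pvBsContains c item (c.length + 1) 0 (PySem.List.len c - 1)))

-- ===== PRECONDITION & SPEC =====
-- Python A raises IndexError (sorted_compartments[0]) on the empty list; excluded.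
def Pre_get_common_items_in_compartments (compartments_with_sorted_items : List (List String)) : Prop := compartments_with_sorted_items ≠ []
instance (compartments_with_sorted_items : List (List String)) : Decidable (Pre_get_common_items_in_compartments compartments_with_sorted_items) := by unfold Pre_get_common_items_in_compartments; infer_instance
def pvWitness_get_common_items_in_compartments : List (List String) := [["a", "b"], ["b"]]

def Spec_get_common_items_in_compartments (compartments_with_sorted_items : List (List String)) (out : Option String) : Prop := out = get_common_items_in_compartments_alt compartments_with_sorted_items
instance (compartments_with_sorted_items : List (List String)) (out : Option String) : Decidable (Spec_get_common_items_in_compartments compartments_with_sorted_items out) := by unfold Spec_get_common_items_in_compartments; infer_instance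

-- ===== CLAIM (what is proved, stated in full; the proofs are below) =====
def Claim_equal_get_common_items_in_compartments : Prop := ∀ (compartments_with_sorted_items : List (List String)), Dom_get_common_items_in_compartments compartments_with_sorted_items → Pre_get_common_items_in_compartments compartments_with_sorted_items → Spec_get_common_items_in_compartments compartments_with_sorted_items (get_common_items_in_compartments compartments_with_sorted_items)

-- ===== LEMMAS AND PROOFS =====

-- the two binary searches make the same comparisons: the loop returns a nonnegative index
-- exactly when the recursion returns true (needs 0 ≤ low, which every reachable state has)
theorem pvBs_agree (items : List String) (item : String) :
    ∀ (fuel : Nat) (low high : Int), 0 ≤ low →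
      pvBsContains items item fuel low high = !decide (pvBsLoop items item fuel low high < 0) := by
  intro fuel
  induction fuel with
  | zero => intro low high hl; rfl
  | succ n ih =>
      intro low high hl
      rw [pvBsContains, pvBsLoop]
      by_cases hle : low ≤ high
      · have hmid0 : 0 ≤ PySem.Int.floordiv (high - low) 2 := by
          have hd : PySem.Int.floordiv (high - low) 2 = (high - low) / 2 :=
            PySem.Int.floordiv_eq_ediv_of_pos (by norm_num)
          omega
        simp only [if_pos hle, if_neg (not_lt.mpr hle)]
        set mid := low + PySem.Int.floordiv (high - low) 2 with hmiddef
        set v := PySem.List.pyGetD items mid "" with hvdef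
        by_cases hv : v = item
        · simp [hv]; omega
        · by_cases hlt : v < item
          · simp only [if_neg hv, if_pos hlt]
            exact ih (mid + 1) high (by omega)
          · simp only [if_neg hv, if_neg hlt]
            exact ih low (mid - 1) hl
      · simp [hle, lt_of_not_ge hle]

-- the inner flag/break loop of A is the 'all' of B
theorem pvCheck_eq_all (item : String) :
    ∀ comps : List (List String),
      pvCheckA comps item
        = comps.all (fun c => pvBsContains c item (c.length + 1) 0 (PySem.List.len c - 1)) := by
  intro comps
  induction comps with
  | nil => rfl
  | cons c rest ih =>
      have h := pvBs_agree c item (c.length + 1) 0 (PySem.List.len c - 1) (le_refl 0)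
      rw [pvCheckA, List.all_cons, ih]
      by_cases hneg : binary_search c item < 0
      · have hc : pvBsContains c item (c.length + 1) 0 (PySem.List.len c - 1) = false := by
          rw [h]; unfold binary_search at hneg; simpa using hneg
        rw [if_pos hneg, hc, Bool.false_and]
      · have hc : pvBsContains c item (c.length + 1) 0 (PySem.List.len c - 1) = true := by
          rw [h]; unfold binary_search at hneg; simpa using hneg
        rw [if_neg hneg, hc, Bool.true_and]

-- the outer flag/return loop of A is the find? of B
theorem pvOuter_eq_find (other : List (List String)) :
    ∀ items : List String,
      pvOuterA other items
        = items.find? (fun item =>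
            other.all (fun c => pvBsContains c item (c.length + 1) 0 (PySem.List.len c - 1))) := by
  intro items
  induction items with
  | nil => rfl
  | cons x rest ih =>
      rw [pvOuterA, List.find?_cons, pvCheck_eq_all, ih]
      cases other.all (fun c => pvBsContains c x (c.length + 1) 0 (PySem.List.len c - 1)) with
      | true => simp only [if_true]
      | false => simp only [Bool.false_eq_true, if_false]

-- ===== VERDICT (by name: the statement is the Claim_ definition above) =====
theorem get_common_items_in_compartments_spec : Claim_equal_get_common_items_in_compartments := by
  intro cs _ _
  unfold Spec_get_common_items_in_compartments
  unfold get_common_items_in_compartments get_common_items_in_compartments_alt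
  cases h : PySem.List.sorted cs (fun c => c.length) false with
  | nil => rfl
  | cons first rest =>
      simp only [PySem.List.pyGet?_zero_cons, PySem.List.slice_from_one, List.tail_cons]
      exact pvOuter_eq_find rest first
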